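-- pv_equiv track=rewrite | github.com/boromir674/topic-modeling-toolkit | patmtk/patm/modeling/regularization/trajectory.py | _steady_iteration_ranges
-- ===== SOURCE A (Python) =====
-- def _steady_iteration_ranges(iterations_groups):
--     """
--     This [5, 2, 1, 1, 1, 1] leads to this [[1,5], [6,7]]\n
--     This [5, 2, 1, 1, 4, 1] leads to this [[1,5], [6,7], [10,13]].\n
--     :param list iterations_groups:
--     :return:
--     :rtype: list indeces start from 1 (not 0) !
--     """
--     res = []
--     accumulated_iters = 1
--     for iter_chunk in iterations_groups:
--         left_iter_count = accumulated_iters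
--         if iter_chunk > 1:
--             right_iter_count = left_iter_count + iter_chunk - 1
--             res.append([left_iter_count, right_iter_count])
--             accumulated_iters += iter_chunk
--         else:
--             accumulated_iters += 1
--     return res
-- ===== SOURCE B (Python) =====
-- def _steady_iteration_ranges(iterations_groups):
--     # Two passes: first compute cumulative 1-based start positions, then emit ranges.
--     starts = [1]
--     for c in iterations_groups:
--         starts.append(starts[-1] + (c if c > 1 else 1))
--     return [[s, s + c - 1] for s, c in zip(starts, iterations_groups) if c > 1]
-- ===== Notes on version B (the rewrite author's own statement) =====
-- stated objective: alternative
-- what changed: Replaces the single stateful loop (running counter plus conditional append) by two separate passes: a prefix-sum of start positions followed by a zip/filter comprehension that emits the ranges.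
import Mathlib
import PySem

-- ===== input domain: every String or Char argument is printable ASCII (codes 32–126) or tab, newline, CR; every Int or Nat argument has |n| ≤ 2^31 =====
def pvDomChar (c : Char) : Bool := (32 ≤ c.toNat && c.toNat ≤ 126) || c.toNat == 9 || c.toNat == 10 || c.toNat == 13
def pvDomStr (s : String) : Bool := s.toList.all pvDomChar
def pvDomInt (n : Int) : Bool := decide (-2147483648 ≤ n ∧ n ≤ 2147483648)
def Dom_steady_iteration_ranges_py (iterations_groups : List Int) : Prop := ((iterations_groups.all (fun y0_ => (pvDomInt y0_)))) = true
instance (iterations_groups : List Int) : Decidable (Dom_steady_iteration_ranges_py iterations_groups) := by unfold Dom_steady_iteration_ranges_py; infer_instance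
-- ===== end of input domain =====

-- B separates index computation from range emission: a prefix-sum pass then a zip/filter pass (alternative decomposition, same cost).


-- ===== PORT A =====
def steady_iteration_ranges_py (iterations_groups : List Int) : List (List Int) :=
  (iterations_groups.foldl
    (fun (st : List (List Int) × Int) (iter_chunk : Int) =>
      if iter_chunk > 1 then
        (st.1 ++ [[st.2, st.2 + iter_chunk - 1]], st.2 + iter_chunk)
      else
        (st.1, st.2 + 1))
    (([] : List (List Int)), (1 : Int))).1

-- ===== PORT B =====
-- cumulative start positions: starts = [1]; starts.append(starts[-1] + (c if c > 1 else 1))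
def pvStarts : Int → List Int → List Int
  | s, [] => [s]
  | s, c :: rest => s :: pvStarts (s + (if c > 1 then c else 1)) rest

def steady_iteration_ranges_py_alt (iterations_groups : List Int) : List (List Int) :=
  (((pvStarts 1 iterations_groups).zip iterations_groups).filter
      (fun p => decide (p.2 > 1))).map (fun p => [p.1, p.1 + p.2 - 1])

-- ===== PRECONDITION & SPEC =====
def Spec_steady_iteration_ranges_py (iterations_groups : List Int) (out : List (List Int)) : Prop := out = steady_iteration_ranges_py_alt iterations_groups
instance (iterations_groups : List Int) (out : List (List Int)) : Decidable (Spec_steady_iteration_ranges_py iterations_groups out) := by unfold Spec_steady_iteration_ranges_py; infer_instance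

-- ===== CLAIM (what is proved, stated in full; the proofs are below) =====
def Claim_equal_steady_iteration_ranges_py : Prop := ∀ (iterations_groups : List Int), Dom_steady_iteration_ranges_py iterations_groups → Spec_steady_iteration_ranges_py iterations_groups (steady_iteration_ranges_py iterations_groups)

-- ===== LEMMAS AND PROOFS =====

-- ===== VERDICT (by name: the statement is the Claim_ definition above) =====
lemma pv_loop_eq (igs : List Int) : ∀ (res : List (List Int)) (s : Int),
    (igs.foldl
      (fun (st : List (List Int) × Int) (iter_chunk : Int) =>
        if iter_chunk > 1 then
          (st.1 ++ [[st.2, st.2 + iter_chunk - 1]], st.2 + iter_chunk)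
        else
          (st.1, st.2 + 1))
      (res, s)).1
    = res ++ (((pvStarts s igs).zip igs).filter
        (fun p => decide (p.2 > 1))).map (fun p => [p.1, p.1 + p.2 - 1]) := by
  induction igs with
  | nil => intro res s; simp [pvStarts]
  | cons c rest ih =>
    intro res s
    by_cases h : c > 1 <;> simp [pvStarts, h, ih, List.foldl_cons]

-- ===== VERDICT (by name: the statement is the Claim_ definition above) =====
theorem steady_iteration_ranges_py_spec : Claim_equal_steady_iteration_ranges_py := by
  intro igs _
  show steady_iteration_ranges_py igs = steady_iteration_ranges_py_alt igs
  unfold steady_iteration_ranges_py steady_iteration_ranges_py_alt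
  simpa using pv_loop_eq igs [] 1
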